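-- pv_equiv track=rewrite | github.com/Schroters/Learning-project | Codewars/Strings: swap vowels case.py | swap_vowel_case
-- ===== SOURCE A (Python) =====
-- def swap_vowel_case(st):
--     vowels, new_st = ["a", "A", "e", "E", "i", "I", "o", "O", "u", "U"], ""
--     for i in st:
--         if i in vowels:
--             if i.islower():
--                 new_st += i.upper()
--             elif i.isupper():
--                 new_st += i.lower()
--         else:
--             new_st += i
--     return new_st
-- ===== SOURCE B (Python) =====
-- _VOWEL_TABLE = str.maketrans('aeiouAEIOU', 'AEIOUaeiou')
--
-- def swap_vowel_case(st):
--     return st.translate(_VOWEL_TABLE)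
-- ===== Notes on version B (the rewrite author's own statement) =====
-- stated objective: idiomatic
-- what changed: Replaces the explicit per-character loop with branches and a string accumulator by a precomputed str.maketrans translation table applied in one st.translate call.
import Mathlib
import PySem

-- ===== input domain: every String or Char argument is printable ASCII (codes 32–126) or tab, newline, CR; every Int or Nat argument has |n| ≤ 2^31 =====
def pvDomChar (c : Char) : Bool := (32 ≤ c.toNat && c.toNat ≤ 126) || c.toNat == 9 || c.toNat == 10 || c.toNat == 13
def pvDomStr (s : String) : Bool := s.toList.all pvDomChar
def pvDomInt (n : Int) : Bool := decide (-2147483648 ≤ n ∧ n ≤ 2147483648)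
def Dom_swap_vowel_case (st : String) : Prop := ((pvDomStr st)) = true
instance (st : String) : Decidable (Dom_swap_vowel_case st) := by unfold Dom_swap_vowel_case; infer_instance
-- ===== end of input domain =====

-- B replaces A's per-character branch loop with a precomputed translation table applied by a single map (idiomatic).

-- ===== PORT A =====
def pvVowels : List Char := ['a', 'A', 'e', 'E', 'i', 'I', 'o', 'O', 'u', 'U']

def swap_vowel_case (st : String) : String :=
  String.mk (st.toList.foldl (fun new_st i =>
    if i ∈ pvVowels then
      if PySem.Chars.islower i then new_st ++ [PySem.Chars.upperChar i]
      else if PySem.Chars.isupper i then new_st ++ [PySem.Chars.lowerChar i]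
      else new_st
    else new_st ++ [i]) [])

-- ===== PORT B =====
-- str.maketrans('aeiouAEIOU', 'AEIOUaeiou') as an association list
def pvTable : List (Char × Char) :=
  [('a','A'), ('e','E'), ('i','I'), ('o','O'), ('u','U'),
   ('A','a'), ('E','e'), ('I','i'), ('O','o'), ('U','u')]

-- st.translate(table): absent characters pass through unchanged
def pvTranslate (c : Char) : Char :=
  ((pvTable.find? (fun p => p.1 == c)).map Prod.snd).getD c

def swap_vowel_case_alt (st : String) : String :=
  String.mk (st.toList.map pvTranslate)

-- ===== PRECONDITION & SPEC =====
def Spec_swap_vowel_case (st : String) (out : String) : Prop := out = swap_vowel_case_alt st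
instance (st : String) (out : String) : Decidable (Spec_swap_vowel_case st out) := by unfold Spec_swap_vowel_case; infer_instance

-- ===== CLAIM (what is proved, stated in full; the proofs are below) =====
def Claim_equal_swap_vowel_case : Prop := ∀ (st : String), Dom_swap_vowel_case st → Spec_swap_vowel_case st (swap_vowel_case st)

-- ===== LEMMAS AND PROOFS =====

-- A's loop step always appends exactly the translated character
theorem pv_step_eq (acc : List Char) (c : Char) :
    (if c ∈ pvVowels then
      if PySem.Chars.islower c then acc ++ [PySem.Chars.upperChar c]
      else if PySem.Chars.isupper c then acc ++ [PySem.Chars.lowerChar c]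
      else acc
    else acc ++ [c]) = acc ++ [pvTranslate c] := by
  by_cases h : c ∈ pvVowels
  · simp only [pvVowels, List.mem_cons, List.not_mem_nil, or_false] at h
    rcases h with h | h | h | h | h | h | h | h | h | h <;> subst h <;> rfl
  · simp only [h, if_false]
    have hfind : pvTable.find? (fun p => p.1 == c) = none := by
      rw [List.find?_eq_none]
      intro p hp
      simp only [pvVowels, List.mem_cons, List.not_mem_nil, or_false, not_or] at h
      obtain ⟨h1, h2, h3, h4, h5, h6, h7, h8, h9, h10⟩ := h
      fin_cases hp <;> intro hh <;> simp only [beq_iff_eq] at hh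
      exacts [h1 hh.symm, h3 hh.symm, h5 hh.symm, h7 hh.symm, h9 hh.symm,
              h2 hh.symm, h4 hh.symm, h6 hh.symm, h8 hh.symm, h10 hh.symm]
    simp [pvTranslate, hfind]

theorem pv_foldl_eq (l : List Char) (acc : List Char) :
    (l.foldl (fun new_st i =>
      if i ∈ pvVowels then
        if PySem.Chars.islower i then new_st ++ [PySem.Chars.upperChar i]
        else if PySem.Chars.isupper i then new_st ++ [PySem.Chars.lowerChar i]
        else new_st
      else new_st ++ [i]) acc) = acc ++ l.map pvTranslate := by
  induction l generalizing acc with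
  | nil => simp
  | cons c l ih =>
    rw [List.foldl_cons, pv_step_eq, ih]
    simp

-- ===== VERDICT (by name: the statement is the Claim_ definition above) =====
theorem swap_vowel_case_spec : Claim_equal_swap_vowel_case := by
  intro st _
  unfold Spec_swap_vowel_case swap_vowel_case swap_vowel_case_alt
  rw [pv_foldl_eq]
  simp
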